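-- pv_equiv track=rewrite | github.com/Michael-huo/ExpHub | exphub/pipeline/prompt/service.py | _has_obvious_conflict
-- ===== SOURCE A (Python) =====
-- def _has_obvious_conflict(counts, default, total):
--     # type: (Dict[str, int], str, int) -> bool
--     active = []
--     for key, value in counts.items():
--         if str(key) == str(default):
--             continue
--         if int(value) <= 0:
--             continue
--         active.append((str(key), int(value)))
--     if len(active) <= 1:
--         return False
--     active.sort(key=lambda item: (-int(item[1]), item[0]))
--     return int(active[1][1]) >= max(2, (int(total) + 2) // 3)
-- ===== SOURCE B (Python) =====
-- def _has_obvious_conflict(counts, default, total):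
--     # Single pass: track the two largest positive non-default counts; no list, no sort.
--     active = 0
--     first = None
--     second = None
--     for key, value in counts.items():
--         if str(key) == str(default):
--             continue
--         v = int(value)
--         if v <= 0:
--             continue
--         active += 1
--         if first is None:
--             second = first
--             first = v
--         elif v > first:
--             second = first
--             first = v
--         elif second is None or v > second:
--             second = v
--     if active <= 1:
--         return False
--     return second >= max(2, (int(total) + 2) // 3)
-- ===== Notes on version B (the rewrite author's own statement) =====
-- stated objective: faster
-- what changed: Replaces building a filtered list and sorting it by (-value, key) with a single pass that counts active entries and tracks only the two largest values, since the decision reads only the second-largest value.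
import Mathlib
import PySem

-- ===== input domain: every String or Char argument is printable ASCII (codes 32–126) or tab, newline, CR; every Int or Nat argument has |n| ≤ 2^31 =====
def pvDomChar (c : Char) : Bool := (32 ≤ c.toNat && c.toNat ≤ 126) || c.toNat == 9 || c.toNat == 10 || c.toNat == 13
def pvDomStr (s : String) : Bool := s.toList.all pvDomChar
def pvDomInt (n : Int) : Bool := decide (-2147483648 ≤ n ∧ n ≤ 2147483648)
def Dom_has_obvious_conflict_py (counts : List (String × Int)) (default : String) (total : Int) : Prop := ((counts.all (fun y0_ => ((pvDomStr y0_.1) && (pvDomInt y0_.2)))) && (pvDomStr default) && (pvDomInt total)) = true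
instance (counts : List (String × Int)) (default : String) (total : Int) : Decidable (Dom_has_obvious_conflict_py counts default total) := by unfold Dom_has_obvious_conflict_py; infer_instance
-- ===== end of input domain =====

-- B replaces A's build-filter-then-sort with a single pass tracking the count of active
-- entries and the two largest values; the decision reads only the second-largest value.


-- ===== PORT A =====
-- literal port: build 'active' by appending, sort by (-value, key), test active[1][1]
-- (active[1] is read inside the 'length > 1' branch, so the index is in range; a total match replaces it)
def has_obvious_conflict_py (counts : List (String × Int)) (default : String) (total : Int) : Bool :=
  let active : List (String × Int) :=
    counts.foldl (fun acc kv =>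
      if kv.1 == default then acc
      else if kv.2 ≤ 0 then acc
      else acc ++ [(kv.1, kv.2)]) []
  if active.length ≤ 1 then false
  else
    let s := PySem.List.sorted2 active (fun it => -it.2) (fun it => it.1)
    match s with
    | _ :: y :: _ => decide (y.2 ≥ max 2 (PySem.Int.floordiv (total + 2) 3))
    | _ => false

-- ===== PORT B =====
-- B's loop body: bump the active counter and update the two largest values seen
def pvUpdTop (st : Int × Option Int × Option Int) (v : Int) : Int × Option Int × Option Int :=
  match st with
  | (n, first, second) =>
    match first with
    | none => (n + 1, some v, first)
    | some f =>
      if v > f then (n + 1, some v, some f)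
      else
        match second with
        | none => (n + 1, some f, some v)
        | some s => if v > s then (n + 1, some f, some v) else (n + 1, some f, some s)

def has_obvious_conflict_py_alt (counts : List (String × Int)) (default : String) (total : Int) : Bool :=
  let st :=
    counts.foldl (fun st kv =>
      if kv.1 == default then st
      else if kv.2 ≤ 0 then st
      else pvUpdTop st kv.2) ((0 : Int), (none : Option Int), (none : Option Int))
  if st.1 ≤ 1 then false
  else
    match st.2.2 with
    | some s => decide (s ≥ max 2 (PySem.Int.floordiv (total + 2) 3))
    | none => false

-- ===== PRECONDITION & SPEC =====
def Spec_has_obvious_conflict_py (counts : List (String × Int)) (default : String) (total : Int) (out : Bool) : Prop := out = has_obvious_conflict_py_alt counts default total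
instance (counts : List (String × Int)) (default : String) (total : Int) (out : Bool) : Decidable (Spec_has_obvious_conflict_py counts default total out) := by unfold Spec_has_obvious_conflict_py; infer_instance

-- ===== CLAIM (what is proved, stated in full; the proofs are below) =====
def Claim_equal_has_obvious_conflict_py : Prop := ∀ (counts : List (String × Int)) (default : String) (total : Int), Dom_has_obvious_conflict_py counts default total → Spec_has_obvious_conflict_py counts default total (has_obvious_conflict_py counts default total)

-- ===== LEMMAS AND PROOFS =====

-- descending sort of the filtered values, the common reference point
def pvSd (l : List Int) : List Int := l.insertionSort (· ≥ ·)

lemma pvSd_pairwise (l : List Int) : (pvSd l).Pairwise (· ≥ ·) :=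
  List.pairwise_insertionSort _ l

lemma pvSd_perm (l : List Int) : (pvSd l).Perm l := List.perm_insertionSort _ l

lemma pv_eq_of_perm_sorted {l1 l2 : List Int} (p : l1.Perm l2)
    (s1 : l1.Pairwise (· ≥ ·)) (s2 : l2.Pairwise (· ≥ ·)) : l1 = l2 :=
  List.Perm.eq_of_pairwise (fun _ _ _ _ h1 h2 => le_antisymm h2 h1) s1 s2 p

lemma pvSd_append (l : List Int) (x : Int) :
    pvSd (l ++ [x]) = List.orderedInsert (· ≥ ·) x (pvSd l) := by
  have h1 : pvSd (l ++ [x]) = pvSd (x :: l) := by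
    apply pv_eq_of_perm_sorted
    · exact (pvSd_perm _).trans ((List.perm_append_singleton x l).trans (pvSd_perm _).symm)
    · exact pvSd_pairwise _
    · exact pvSd_pairwise _
  simpa [pvSd, List.insertionSort] using h1

-- B's update computes the head and second element of the descending insertion
lemma pvUpdTop_orderedInsert (sd : List Int) (hs : sd.Pairwise (· ≥ ·)) (n : Int) (x : Int) :
    pvUpdTop (n, sd.head?, sd.tail.head?) x =
      (n + 1, (List.orderedInsert (· ≥ ·) x sd).head?, (List.orderedInsert (· ≥ ·) x sd).tail.head?) := by
  match sd, hs with
  | [], _ => simp [pvUpdTop, List.orderedInsert]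
  | [a], _ =>
    by_cases h : a ≤ x
    · by_cases h2 : x > a
      · simp [pvUpdTop, List.orderedInsert, h, h2]
      · have : x = a := by omega
        subst this
        simp [pvUpdTop, List.orderedInsert]
    · simp [pvUpdTop, List.orderedInsert, h]
      omega
  | a :: b :: t, hp =>
    have hba : b ≤ a := (List.pairwise_cons.1 hp).1 b (by simp)
    by_cases h : a ≤ x
    · by_cases h2 : x > a
      · simp [pvUpdTop, List.orderedInsert, h, h2]
      · have hxa : x = a := by omega
        subst hxa
        by_cases h3 : x > b
        · simp [pvUpdTop, List.orderedInsert, h3]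
        · have : b = x := by omega
          simp [pvUpdTop, List.orderedInsert, this]
    · have h2 : ¬ x > a := by omega
      by_cases h3 : x > b
      · have hbx : b ≤ x := by omega
        simp [pvUpdTop, List.orderedInsert, h, h2, h3, hbx]
      · by_cases hbx : b ≤ x
        · have : x = b := by omega
          subst this
          simp [pvUpdTop, List.orderedInsert, h, h2]
        · simp [pvUpdTop, List.orderedInsert, h, h2, h3, hbx]

-- B's whole fold over a value list: count, max, second max
lemma pv_fold_updTop (l : List Int) :
    l.foldl pvUpdTop ((0 : Int), (none : Option Int), (none : Option Int)) =
      ((l.length : Int), (pvSd l).head?, (pvSd l).tail.head?) := by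
  induction l using List.reverseRecOn with
  | nil => simp [pvSd, List.insertionSort]
  | append_singleton l x ih =>
    rw [List.foldl_append, List.foldl_cons, List.foldl_nil, ih,
      pvUpdTop_orderedInsert _ (pvSd_pairwise l), pvSd_append]
    have : ((l ++ [x]).length : Int) = (l.length : Int) + 1 := by simp
    rw [this]

-- sorted2 with first key (-value) yields values pairwise descending
lemma pv_insertBy_pairwise {α : Type} (before : α → α → Bool) (R : α → α → Prop)
    (htrans : ∀ {a b c}, R a b → R b c → R a c)
    (h1 : ∀ a b, before a b = true → R a b) (h2 : ∀ a b, before a b = false → R b a)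
    (x : α) (ys : List α) (hys : ys.Pairwise R) :
    (PySem.List.insertBy before x ys).Pairwise R := by
  induction ys with
  | nil => simp [PySem.List.insertBy]
  | cons y ys ih =>
    rcases List.pairwise_cons.1 hys with ⟨hy, hys'⟩
    by_cases hb : before x y = true
    · rw [show PySem.List.insertBy before x (y :: ys) = x :: y :: ys by
        simp [PySem.List.insertBy, hb]]
      refine List.pairwise_cons.2 ⟨?_, hys⟩
      intro z hz
      rcases List.mem_cons.1 hz with rfl | hz'
      · exact h1 _ _ hb
      · exact htrans (h1 _ _ hb) (hy z hz')
    · rw [show PySem.List.insertBy before x (y :: ys) = y :: PySem.List.insertBy before x ys by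
        simp [PySem.List.insertBy, hb]]
      refine List.pairwise_cons.2 ⟨?_, ih hys'⟩
      intro z hz
      rcases (PySem.List.mem_insertBy before x z ys).1 hz with rfl | hz'
      · exact h2 _ _ (by simpa using hb)
      · exact hy z hz'

lemma pv_sorted2_values_pairwise (l : List (String × Int)) :
    ((PySem.List.sorted2 l (fun it => -it.2) (fun it => it.1)).map Prod.snd).Pairwise (· ≥ ·) := by
  have key : ∀ (xs : List (String × Int)) (acc : List (String × Int)),
      acc.Pairwise (fun a b => a.2 ≥ b.2) →
      (xs.foldl (fun acc x => PySem.List.insertBy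
        (fun a b => decide ((-a.2 : Int) < -b.2) || !decide ((-b.2 : Int) < -a.2) && decide (a.1 < b.1))
        x acc) acc).Pairwise (fun a b => a.2 ≥ b.2) := by
    intro xs
    induction xs with
    | nil => intro acc h; simpa using h
    | cons x xs ih =>
      intro acc h
      rw [List.foldl_cons]
      apply ih
      refine pv_insertBy_pairwise _ (fun a b => a.2 ≥ b.2)
        (fun hab hbc => le_trans hbc hab) ?_ ?_ x acc h
      · intro a b hb
        simp only [Bool.or_eq_true, decide_eq_true_eq, Bool.and_eq_true, Bool.not_eq_true',
          decide_eq_false_iff_not] at hb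
        rcases hb with hlt | ⟨hne, _⟩ <;> omega
      · intro a b hb
        simp only [Bool.or_eq_false_iff, decide_eq_false_iff_not] at hb
        omega
  have := key l [] (by simp)
  exact List.Pairwise.map _ (fun {a b} h => h) (by
    simpa [PySem.List.sorted2] using this)

-- the filter both loops perform
def pvKeep (default : String) (kv : String × Int) : Bool := !(kv.1 == default) && !(kv.2 ≤ 0)

lemma pvA_active (counts : List (String × Int)) (default : String) :
    counts.foldl (fun acc kv =>
      if kv.1 == default then acc
      else if kv.2 ≤ 0 then acc
      else acc ++ [(kv.1, kv.2)]) [] = counts.filter (pvKeep default) := by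
  have h := PySem.List.foldl_append_if_eq_filter (pvKeep default) counts []
  rw [← List.nil_append (counts.filter (pvKeep default)), ← h]
  apply PySem.List.foldl_congr_mem
  intro acc kv _
  by_cases h1 : kv.1 == default <;> by_cases h2 : kv.2 ≤ 0 <;>
    simp [pvKeep, h1, h2]

lemma pvB_fold (counts : List (String × Int)) (default : String) :
    counts.foldl (fun st kv =>
      if kv.1 == default then st
      else if kv.2 ≤ 0 then st
      else pvUpdTop st kv.2) ((0 : Int), (none : Option Int), (none : Option Int)) =
    ((counts.filter (pvKeep default)).map Prod.snd).foldl pvUpdTop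
      ((0 : Int), (none : Option Int), (none : Option Int)) := by
  rw [List.foldl_map]
  have h := PySem.List.foldl_if_eq_foldl_filter (pvKeep default)
    (fun st (kv : String × Int) => pvUpdTop st kv.2) counts
    (((0 : Int), (none : Option Int), (none : Option Int)))
  rw [← h]
  apply PySem.List.foldl_congr_mem
  intro acc kv _
  by_cases h1 : kv.1 == default <;> by_cases h2 : kv.2 ≤ 0 <;>
    simp [pvKeep, h1, h2]

-- ===== VERDICT (by name: the statement is the Claim_ definition above) =====
theorem has_obvious_conflict_py_spec : Claim_equal_has_obvious_conflict_py := by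
  intro counts default total _
  unfold Spec_has_obvious_conflict_py has_obvious_conflict_py has_obvious_conflict_py_alt
  rw [pvA_active, pvB_fold, pv_fold_updTop]
  set act := counts.filter (pvKeep default) with hact
  set vals := act.map Prod.snd with hvals
  have hlen : vals.length = act.length := by simp [hvals]
  -- the sorted2 values equal pvSd vals
  have hmapeq : (PySem.List.sorted2 act (fun it => -it.2) (fun it => it.1)).map Prod.snd
      = pvSd vals := by
    apply pv_eq_of_perm_sorted
    · exact ((PySem.List.sorted2_perm act _ _ false).map Prod.snd).trans (pvSd_perm vals).symm
    · exact pv_sorted2_values_pairwise act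
    · exact pvSd_pairwise vals
  by_cases hsmall : act.length ≤ 1
  · simp only [hsmall, if_true]
    have : ((vals.length : Int) ≤ 1) := by omega
    simp [this]
  · simp only [hsmall, if_false]
    have h2 : ¬ ((vals.length : Int) ≤ 1) := by omega
    simp only [h2, if_false]
    -- both sides read the second element of pvSd vals
    have hsdlen : (pvSd vals).length = vals.length := (pvSd_perm vals).length_eq
    have hslen : (PySem.List.sorted2 act (fun it => -it.2) (fun it => it.1)).length = act.length :=
      (PySem.List.sorted2_perm act _ _ false).length_eq
    match hS : PySem.List.sorted2 act (fun it => -it.2) (fun it => it.1), hD : pvSd vals with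
    | [], _ | [_], _ => rw [hS] at hslen; simp at hslen; omega
    | _ :: _ :: _, [] | _ :: _ :: _, [_] => rw [hD] at hsdlen; simp at hsdlen; omega
    | a :: y :: s, d1 :: d2 :: ds =>
      rw [hS, hD] at hmapeq
      simp only [List.map_cons, List.cons.injEq] at hmapeq
      simp [hmapeq.2.1]
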